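-- pv_equiv track=rewrite | github.com/LindeSchoenmaker/IMERGE-FEP | rhfe_gromacs/hybrid_top_dum.py | get_multiplicity_atoms
-- ===== SOURCE A (Python) =====
-- from itertools import chain, compress
--
-- def get_multiplicity_atoms(bridge, P2s, P3s, res, set_to_90):
--     multiplicity_atoms = None
--     if not set_to_90:
--         # for dual anchored save dihedrals
--         multiplicity_atoms = []
--         dual_idx = [len(x) == 2 for x in P2s.values()]
--         P1s_dual = list(compress(list(P2s.keys()), dual_idx))
--         for loc in bridge['A']:
--             if loc[0] not in P1s_dual:
--                 continue
--             P3 = None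
--             D1_A = loc[1]
--             P1 = loc[0]
--             P2_atoms = P2s[P1]
--             for P2_atom in P2_atoms:
--                 if P2_atom not in res:
--                     continue
--                 if P2_atom in list(P3s.keys()):
--                     P2 = P2_atom
--                     P3 = P3s[P2][0]
--                     multiplicity_atoms.append((D1_A, P1, P2, P3))
--                     D1_B = [
--                         x[1] for x in bridge['B']
--                         if x[0] == P1
--                     ][0]
--                     multiplicity_atoms.append((D1_B, P1, P2, P3))
--                     break
--             if P3 is None:
--                 for P2_atom in P2_atoms:
--                     if P2_atom in list(P3s.keys()):
--                         P2 = P2_atom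
--                         P3 = P3s[P2][0]
--                         multiplicity_atoms.append((D1_A, P1, P2, P3))
--                         D1_B = [
--                             x[1] for x in bridge['B']
--                             if x[0] == P1
--                         ][0]
--                         multiplicity_atoms.append((D1_B, P1, P2, P3))
--                         break
--             if P3 is None:
--                 raise KeyError(
--                     "No dihedrals found to anchor dual dummy point, use 90 degree setting instead"
--                 )
--
--     return multiplicity_atoms
-- ===== SOURCE B (Python) =====
-- def get_multiplicity_atoms(bridge, P2s, P3s, res, set_to_90):
--     if set_to_90:
--         return None
--     out = []
--     dual = {k for k, v in P2s.items() if len(v) == 2}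
--     for P1, D1_A in bridge['A']:
--         if P1 not in dual:
--             continue
--         # single pass: first atom that is in res AND a P3s key wins immediately;
--         # otherwise remember the first atom that is a P3s key as fallback
--         preferred = None
--         fallback = None
--         for atom in P2s[P1]:
--             if atom in P3s:
--                 if atom in res:
--                     preferred = atom
--                     break
--                 if fallback is None:
--                     fallback = atom
--         P2 = preferred if preferred is not None else fallback
--         if P2 is None:
--             raise KeyError(
--                 "No dihedrals found to anchor dual dummy point, use 90 degree setting instead"
--             )
--         P3 = P3s[P2][0]
--         D1_B = next(x[1] for x in bridge['B'] if x[0] == P1)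
--         out.append((D1_A, P1, P2, P3))
--         out.append((D1_B, P1, P2, P3))
--     return out
-- ===== Notes on version B (the rewrite author's own statement) =====
-- stated objective: simpler
-- what changed: The two near-duplicate scans over P2s[P1] (first res-match, then first P3s-key match) are merged into one pass that keeps a preferred/fallback pair, the dual-anchor keys become a set built once, and the D1_B list comprehension plus [0] becomes a single next() over a generator.
import Mathlib
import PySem

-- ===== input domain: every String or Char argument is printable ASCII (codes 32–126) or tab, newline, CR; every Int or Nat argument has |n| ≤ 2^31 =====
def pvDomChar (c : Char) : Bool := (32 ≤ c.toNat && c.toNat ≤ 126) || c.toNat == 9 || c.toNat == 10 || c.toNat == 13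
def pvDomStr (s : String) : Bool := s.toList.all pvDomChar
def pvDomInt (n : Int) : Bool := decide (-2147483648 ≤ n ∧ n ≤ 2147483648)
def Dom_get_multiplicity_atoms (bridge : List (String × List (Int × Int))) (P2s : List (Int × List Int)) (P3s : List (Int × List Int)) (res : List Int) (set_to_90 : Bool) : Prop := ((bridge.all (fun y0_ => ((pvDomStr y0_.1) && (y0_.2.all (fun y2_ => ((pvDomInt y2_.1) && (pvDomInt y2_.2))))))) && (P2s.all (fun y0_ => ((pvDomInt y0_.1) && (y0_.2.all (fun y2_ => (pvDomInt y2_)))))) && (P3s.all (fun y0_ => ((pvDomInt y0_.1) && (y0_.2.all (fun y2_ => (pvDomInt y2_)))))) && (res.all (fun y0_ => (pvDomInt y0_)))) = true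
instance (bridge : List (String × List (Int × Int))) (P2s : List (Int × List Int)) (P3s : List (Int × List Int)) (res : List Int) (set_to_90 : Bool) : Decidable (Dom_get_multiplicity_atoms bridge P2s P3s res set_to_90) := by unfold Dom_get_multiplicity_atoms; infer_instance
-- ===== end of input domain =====

-- B merges A's two near-duplicate scans over P2s[P1] into a single preferred/fallback pass (objective: simpler).
-- `none` in a port marks exactly the paths where its Python raises; those inputs are excluded by Pre_.

-- ===== PORT A =====
-- [x[1] for x in bridge['B'] if x[0] == P1][0]  (none = KeyError on 'B' or IndexError on [0])
def pvA_D1B (bridge : List (String × List (Int × Int))) (P1 : Int) : Option Int :=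
  match PySem.Dict.get? (PySem.Dict.mk bridge) "B" with
  | none => none
  | some lb => PySem.List.pyGet? ((lb.filter (fun x => x.1 == P1)).map (fun x => x.2)) 0

-- A's first loop over P2_atoms: skips atoms not in res; some none = loop fell through (P3 still None)
def pvA_loop1 (bridge : List (String × List (Int × Int))) (P3s : List (Int × List Int))
    (res : List Int) (D1_A P1 : Int) :
    List Int → Option (Option (List (Int × Int × Int × Int)))
  | [] => some none
  | a :: rest =>
    if !(res.contains a) then pvA_loop1 bridge P3s res D1_A P1 rest
    else if (PySem.Dict.keys (PySem.Dict.mk P3s)).contains a then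
      match PySem.Dict.get? (PySem.Dict.mk P3s) a with
      | none => none
      | some l =>
        match PySem.List.pyGet? l 0 with
        | none => none
        | some P3 =>
          match pvA_D1B bridge P1 with
          | none => none
          | some D1_B => some (some [(D1_A, P1, a, P3), (D1_B, P1, a, P3)])
    else pvA_loop1 bridge P3s res D1_A P1 rest

-- A's second loop over P2_atoms: same body without the res test
def pvA_loop2 (bridge : List (String × List (Int × Int))) (P3s : List (Int × List Int))
    (D1_A P1 : Int) :
    List Int → Option (Option (List (Int × Int × Int × Int)))
  | [] => some none
  | a :: rest =>
    if (PySem.Dict.keys (PySem.Dict.mk P3s)).contains a then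
      match PySem.Dict.get? (PySem.Dict.mk P3s) a with
      | none => none
      | some l =>
        match PySem.List.pyGet? l 0 with
        | none => none
        | some P3 =>
          match pvA_D1B bridge P1 with
          | none => none
          | some D1_B => some (some [(D1_A, P1, a, P3), (D1_B, P1, a, P3)])
    else pvA_loop2 bridge P3s D1_A P1 rest

-- itertools.compress
def pvCompress : List Int → List Bool → List Int
  | x :: xs, b :: bs => if b then x :: pvCompress xs bs else pvCompress xs bs
  | _, _ => []

def pvA_outer (bridge : List (String × List (Int × Int))) (P2s P3s : List (Int × List Int))
    (res : List Int) (P1s_dual : List Int) :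
    List (Int × Int) → Option (List (Int × Int × Int × Int))
  | [] => some []
  | loc :: rest =>
    if !(P1s_dual.contains loc.1) then pvA_outer bridge P2s P3s res P1s_dual rest
    else
      match PySem.Dict.get? (PySem.Dict.mk P2s) loc.1 with
      | none => none
      | some P2_atoms =>
        match pvA_loop1 bridge P3s res loc.2 loc.1 P2_atoms with
        | none => none
        | some (some pairs) =>
          match pvA_outer bridge P2s P3s res P1s_dual rest with
          | none => none
          | some tail => some (pairs ++ tail)
        | some none =>
          match pvA_loop2 bridge P3s loc.2 loc.1 P2_atoms with
          | none => none
          | some (some pairs) =>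
            match pvA_outer bridge P2s P3s res P1s_dual rest with
            | none => none
            | some tail => some (pairs ++ tail)
          | some none => none  -- raise KeyError("No dihedrals found …")

def get_multiplicity_atoms (bridge : List (String × List (Int × Int))) (P2s : List (Int × List Int)) (P3s : List (Int × List Int)) (res : List Int) (set_to_90 : Bool) : Option (List (Int × Int × Int × Int)) :=
  if set_to_90 then none
  else
    let dual_idx := (PySem.Dict.values (PySem.Dict.mk P2s)).map (fun x => x.length == 2)
    let P1s_dual := pvCompress (PySem.Dict.keys (PySem.Dict.mk P2s)) dual_idx
    match PySem.Dict.get? (PySem.Dict.mk bridge) "A" with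
    | none => none
    | some la => pvA_outer bridge P2s P3s res P1s_dual la

-- ===== PORT B =====
-- the single scan: break on the first atom in P3s ∧ res; remember the first atom in P3s as fallback
def pvB_pick (P3s : List (Int × List Int)) (res : List Int) :
    List Int → Option Int → Option Int
  | [], fallback => fallback
  | a :: rest, fallback =>
    if PySem.Dict.contains (PySem.Dict.mk P3s) a then
      if res.contains a then some a
      else pvB_pick P3s res rest (if fallback = none then some a else fallback)
    else pvB_pick P3s res rest fallback

def pvB_loop (bridge : List (String × List (Int × Int))) (P2s P3s : List (Int × List Int))
    (res : List Int) (dual : PySem.Set Int) :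
    List (Int × Int) → Option (List (Int × Int × Int × Int))
  | [] => some []
  | (P1, D1_A) :: rest =>
    if !(PySem.Set.contains dual P1) then pvB_loop bridge P2s P3s res dual rest
    else
      match PySem.Dict.get? (PySem.Dict.mk P2s) P1 with
      | none => none
      | some atoms =>
        match pvB_pick P3s res atoms none with
        | none => none  -- raise KeyError("No dihedrals found …")
        | some P2 =>
          match (PySem.Dict.get? (PySem.Dict.mk P3s) P2).bind (fun l => PySem.List.pyGet? l 0) with
          | none => none
          | some P3 =>
            match (PySem.Dict.get? (PySem.Dict.mk bridge) "B").bind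
                (fun lb => (lb.find? (fun x => x.1 == P1)).map (fun x => x.2)) with
            | none => none  -- next() over an empty generator / KeyError on 'B'
            | some D1_B =>
              match pvB_loop bridge P2s P3s res dual rest with
              | none => none
              | some tail => some ((D1_A, P1, P2, P3) :: (D1_B, P1, P2, P3) :: tail)

def get_multiplicity_atoms_alt (bridge : List (String × List (Int × Int))) (P2s : List (Int × List Int)) (P3s : List (Int × List Int)) (res : List Int) (set_to_90 : Bool) : Option (List (Int × Int × Int × Int)) :=
  if set_to_90 then none
  else
    let dual := PySem.Set.ofList
      (((PySem.Dict.mk P2s).items.filter (fun p => p.2.length == 2)).map (fun p => p.1))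
    match PySem.Dict.get? (PySem.Dict.mk bridge) "A" with
    | none => none
    | some la => pvB_loop bridge P2s P3s res dual la

-- ===== PRECONDITION & SPEC =====
-- the anchor atom A's two loops select: first atom in res ∩ keys(P3s), else first atom in keys(P3s)
def pvFirstP2 (P3s : List (Int × List Int)) (res atoms : List Int) : Option Int :=
  (atoms.find? (fun a => res.contains a && (P3s.map (fun p => p.1)).contains a)).orElse
    (fun _ => atoms.find? (fun a => (P3s.map (fun p => p.1)).contains a))

-- a dual-anchored P1 from bridge['A'] can be processed without an exception
def pvP1Ok (bridge : List (String × List (Int × Int))) (P2s P3s : List (Int × List Int))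
    (res : List Int) (P1 : Int) : Bool :=
  match PySem.Dict.get? (PySem.Dict.mk P2s) P1 with
  | none => false
  | some atoms =>
    match pvFirstP2 P3s res atoms with
    | none => false
    | some P2 =>
      (match PySem.Dict.get? (PySem.Dict.mk P3s) P2 with
       | none => false
       | some l => !l.isEmpty) &&
      (match PySem.Dict.get? (PySem.Dict.mk bridge) "B" with
       | none => false
       | some lb => lb.any (fun x => x.1 == P1))

-- Pre_ excludes exactly the inputs where A raises: a missing 'A'/'B' bridge key, a dual P1 with no
-- P2 atom among the P3s keys (A's explicit KeyError), an empty P3s entry at the selected anchor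
-- (IndexError on P3s[P2][0]) or no bridge['B'] entry for P1 (IndexError on the comprehension's [0]).
def Pre_get_multiplicity_atoms (bridge : List (String × List (Int × Int))) (P2s : List (Int × List Int)) (P3s : List (Int × List Int)) (res : List Int) (set_to_90 : Bool) : Prop :=
  (set_to_90 ||
    (match PySem.Dict.get? (PySem.Dict.mk bridge) "A" with
     | none => false
     | some la =>
       la.all (fun loc =>
         !((P2s.filter (fun p => p.2.length == 2)).map (fun p => p.1)).contains loc.1 ||
         pvP1Ok bridge P2s P3s res loc.1))) = true
instance (bridge : List (String × List (Int × Int))) (P2s : List (Int × List Int)) (P3s : List (Int × List Int)) (res : List Int) (set_to_90 : Bool) : Decidable (Pre_get_multiplicity_atoms bridge P2s P3s res set_to_90) := by unfold Pre_get_multiplicity_atoms; infer_instance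

def pvWitness_get_multiplicity_atoms : (List (String × List (Int × Int))) × (List (Int × List Int)) × (List (Int × List Int)) × List Int × Bool :=
  ([("A", [(1, 10)]), ("B", [(1, 20)])], [(1, [2, 3])], [(2, [4])], [2], false)

def Spec_get_multiplicity_atoms (bridge : List (String × List (Int × Int))) (P2s : List (Int × List Int)) (P3s : List (Int × List Int)) (res : List Int) (set_to_90 : Bool) (out : Option (List (Int × Int × Int × Int))) : Prop := out = get_multiplicity_atoms_alt bridge P2s P3s res set_to_90
instance (bridge : List (String × List (Int × Int))) (P2s : List (Int × List Int)) (P3s : List (Int × List Int)) (res : List Int) (set_to_90 : Bool) (out : Option (List (Int × Int × Int × Int))) : Decidable (Spec_get_multiplicity_atoms bridge P2s P3s res set_to_90 out) := by unfold Spec_get_multiplicity_atoms; infer_instance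

-- ===== CLAIM (what is proved, stated in full; the proofs are below) =====
def Claim_equal_get_multiplicity_atoms : Prop := ∀ (bridge : List (String × List (Int × Int))) (P2s : List (Int × List Int)) (P3s : List (Int × List Int)) (res : List Int) (set_to_90 : Bool), Dom_get_multiplicity_atoms bridge P2s P3s res set_to_90 → Pre_get_multiplicity_atoms bridge P2s P3s res set_to_90 → Spec_get_multiplicity_atoms bridge P2s P3s res set_to_90 (get_multiplicity_atoms bridge P2s P3s res set_to_90)

-- ===== LEMMAS AND PROOFS =====

theorem pv_pyGet?_zero {a : Type} (l : List a) : PySem.List.pyGet? l 0 = l.head? := by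
  cases l <;> simp [PySem.List.pyGet?, PySem.List.pyIdx?]

theorem pv_keys_contains (P3s : List (Int × List Int)) (a : Int) :
    (PySem.Dict.keys (PySem.Dict.mk P3s)).contains a = PySem.Dict.contains (PySem.Dict.mk P3s) a := by
  simp [PySem.Dict.keys, PySem.Dict.contains, List.any_eq]

theorem pv_set_contains (xs : List Int) (a : Int) :
    PySem.Set.contains (PySem.Set.ofList xs) a = xs.contains a := by
  simp [PySem.Set.contains]

theorem pv_compress_eq (l : List (Int × List Int)) :
    pvCompress (PySem.Dict.keys (PySem.Dict.mk l)) ((PySem.Dict.values (PySem.Dict.mk l)).map (fun x => x.length == 2)) =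
      (l.filter (fun p => p.2.length == 2)).map (fun p => p.1) := by
  induction l with
  | nil => rfl
  | cons p rest ih =>
    by_cases h : p.2.length == 2 <;>
      simp_all [PySem.Dict.keys, PySem.Dict.values, pvCompress, List.filter_cons]

theorem pv_D1B_eq (bridge : List (String × List (Int × Int))) (P1 : Int) :
    ((PySem.Dict.get? (PySem.Dict.mk bridge) "B").bind
      (fun lb => (lb.find? (fun x => x.1 == P1)).map (fun x => x.2))) = pvA_D1B bridge P1 := by
  unfold pvA_D1B
  cases PySem.Dict.get? (PySem.Dict.mk bridge) "B" with
  | none => rfl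
  | some lb => simp [pv_pyGet?_zero, List.head?_filter, List.head?_map]

-- the value A's loop body produces once an anchor atom a is accepted (none = an exception on that path)
def pvKA (bridge : List (String × List (Int × Int))) (P3s : List (Int × List Int))
    (D1_A P1 a : Int) : Option (List (Int × Int × Int × Int)) :=
  ((PySem.Dict.get? (PySem.Dict.mk P3s) a).bind (fun l => PySem.List.pyGet? l 0)).bind (fun P3 =>
    (pvA_D1B bridge P1).map (fun D1_B => [(D1_A, P1, a, P3), (D1_B, P1, a, P3)]))

theorem pv_loop1_eq (bridge : List (String × List (Int × Int))) (P3s : List (Int × List Int))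
    (res : List Int) (D1_A P1 : Int) (atoms : List Int) :
    pvA_loop1 bridge P3s res D1_A P1 atoms =
      match atoms.find? (fun a => res.contains a && PySem.Dict.contains (PySem.Dict.mk P3s) a) with
      | none => some none
      | some a => (pvKA bridge P3s D1_A P1 a).map some := by
  induction atoms with
  | nil => simp [pvA_loop1]
  | cons a rest ih =>
    rw [pvA_loop1, pv_keys_contains]
    by_cases hr : a ∈ res
    · by_cases hc : PySem.Dict.contains (PySem.Dict.mk P3s) a = true
      · rw [List.find?_cons_of_pos]
        · unfold pvKA
          cases hg : PySem.Dict.get? (PySem.Dict.mk P3s) a with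
          | none => simp [hr, hc, hg]
          | some l =>
            cases hh : PySem.List.pyGet? l 0 with
            | none => simp [hr, hc, hg, hh]
            | some P3 =>
              cases hb : pvA_D1B bridge P1 with
              | none => simp [hr, hc, hg, hh, hb]
              | some D1_B => simp [hr, hc, hg, hh, hb]
        · simp [hr, hc]
      · rw [List.find?_cons_of_neg]
        · simp only [Bool.not_eq_true] at hc
          simp [hr, hc, ih]
        · simp only [Bool.not_eq_true] at hc
          simp [hc]
    · rw [List.find?_cons_of_neg]
      · simp [hr, ih]
      · simp [hr]

theorem pv_loop2_eq (bridge : List (String × List (Int × Int))) (P3s : List (Int × List Int))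
    (D1_A P1 : Int) (atoms : List Int) :
    pvA_loop2 bridge P3s D1_A P1 atoms =
      match atoms.find? (fun a => PySem.Dict.contains (PySem.Dict.mk P3s) a) with
      | none => some none
      | some a => (pvKA bridge P3s D1_A P1 a).map some := by
  induction atoms with
  | nil => simp [pvA_loop2]
  | cons a rest ih =>
    rw [pvA_loop2, pv_keys_contains]
    by_cases hc : PySem.Dict.contains (PySem.Dict.mk P3s) a = true
    · rw [List.find?_cons_of_pos]
      · unfold pvKA
        cases hg : PySem.Dict.get? (PySem.Dict.mk P3s) a with
        | none => simp [hc, hg]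
        | some l =>
          cases hh : PySem.List.pyGet? l 0 with
          | none => simp [hc, hg, hh]
          | some P3 =>
            cases hb : pvA_D1B bridge P1 with
            | none => simp [hc, hg, hh, hb]
            | some D1_B => simp [hc, hg, hh, hb]
      · exact hc
    · rw [List.find?_cons_of_neg]
      · simp only [Bool.not_eq_true] at hc
        simp [hc, ih]
      · simpa using hc

theorem pv_pick_eq (P3s : List (Int × List Int)) (res : List Int) (atoms : List Int) :
    ∀ fb : Option Int, pvB_pick P3s res atoms fb =
      match atoms.find? (fun a => res.contains a && PySem.Dict.contains (PySem.Dict.mk P3s) a) with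
      | some a => some a
      | none => fb.or (atoms.find? (fun a => PySem.Dict.contains (PySem.Dict.mk P3s) a)) := by
  induction atoms with
  | nil => intro fb; cases fb <;> simp [pvB_pick]
  | cons a rest ih =>
    intro fb
    rw [pvB_pick]
    by_cases hc : PySem.Dict.contains (PySem.Dict.mk P3s) a = true
    · by_cases hr : a ∈ res
      · rw [List.find?_cons_of_pos (by simp [hc, hr])]
        simp [hc, hr]
      · rw [List.find?_cons_of_neg (by simp [hr]), List.find?_cons_of_pos hc]
        simp only [hc, if_true, hr, if_false]
        rw [ih]
        cases hf : rest.find? (fun a => res.contains a && PySem.Dict.contains (PySem.Dict.mk P3s) a) with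
        | some x => cases fb <;> simp [hr, hf]
        | none => cases fb <;> simp [hr, hf]
    · rw [List.find?_cons_of_neg (by simp [hc]), List.find?_cons_of_neg (by simpa using hc)]
      simp only [Bool.not_eq_true] at hc
      simp [hc, ih]

theorem pv_outer_eq (bridge : List (String × List (Int × Int))) (P2s P3s : List (Int × List Int))
    (res : List Int) (dualL : List Int) (la : List (Int × Int)) :
    pvA_outer bridge P2s P3s res dualL la =
      pvB_loop bridge P2s P3s res (PySem.Set.ofList dualL) la := by
  induction la with
  | nil => rfl
  | cons loc rest ih =>
    obtain ⟨P1, D1A⟩ := loc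
    rw [pvA_outer, pvB_loop, pv_set_contains]
    by_cases hd : P1 ∈ dualL
    · simp only [hd, List.contains_eq_mem, decide_true, Bool.not_true, Bool.false_eq_true, if_false]
      cases hP2 : PySem.Dict.get? (PySem.Dict.mk P2s) P1 with
      | none => rfl
      | some atoms =>
        simp only
        rw [pv_loop1_eq, pv_loop2_eq, pv_pick_eq, pv_D1B_eq]
        cases h1 : atoms.find? (fun a => res.contains a && PySem.Dict.contains (PySem.Dict.mk P3s) a) with
        | some a =>
          simp only
          cases hk : pvKA bridge P3s D1A P1 a with
          | none =>
            unfold pvKA at hk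
            cases hg : (PySem.Dict.get? (PySem.Dict.mk P3s) a).bind (fun l => PySem.List.pyGet? l 0) with
            | none => simp [hg] at hk ⊢
            | some P3 =>
              rw [hg] at hk
              cases hb : pvA_D1B bridge P1 with
              | none => simp [hg, hb] at hk ⊢
              | some D1_B => simp [hb] at hk
          | some pairs =>
            unfold pvKA at hk
            cases hg : (PySem.Dict.get? (PySem.Dict.mk P3s) a).bind (fun l => PySem.List.pyGet? l 0) with
            | none => simp [hg] at hk
            | some P3 =>
              rw [hg] at hk
              cases hb : pvA_D1B bridge P1 with
              | none => simp [hb] at hk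
              | some D1_B =>
                simp only [hb, Option.map_some] at hk
                rw [Option.bind_some] at hk
                obtain rfl := Option.some.inj hk
                simp only [hg, hb, ih]
                cases pvB_loop bridge P2s P3s res (PySem.Set.ofList dualL) rest <;> simp
        | none =>
          simp only
          cases h2 : atoms.find? (fun a => PySem.Dict.contains (PySem.Dict.mk P3s) a) with
          | none => simp
          | some a =>
            simp only [Option.none_or]
            cases hk : pvKA bridge P3s D1A P1 a with
            | none =>
              unfold pvKA at hk
              cases hg : (PySem.Dict.get? (PySem.Dict.mk P3s) a).bind (fun l => PySem.List.pyGet? l 0) with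
              | none => simp [hg] at hk ⊢
              | some P3 =>
                rw [hg] at hk
                cases hb : pvA_D1B bridge P1 with
                | none => simp [hg, hb] at hk ⊢
                | some D1_B => simp [hb] at hk
            | some pairs =>
              unfold pvKA at hk
              cases hg : (PySem.Dict.get? (PySem.Dict.mk P3s) a).bind (fun l => PySem.List.pyGet? l 0) with
              | none => simp [hg] at hk
              | some P3 =>
                rw [hg] at hk
                cases hb : pvA_D1B bridge P1 with
                | none => simp [hb] at hk
                | some D1_B =>
                  simp only [hb, Option.map_some] at hk
                  rw [Option.bind_some] at hk
                  obtain rfl := Option.some.inj hk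
                  simp only [hg, hb, ih]
                  cases pvB_loop bridge P2s P3s res (PySem.Set.ofList dualL) rest <;> simp
    · simp [hd, ih]

theorem pv_witness_ok :
    Dom_get_multiplicity_atoms (pvWitness_get_multiplicity_atoms.1) (pvWitness_get_multiplicity_atoms.2.1) (pvWitness_get_multiplicity_atoms.2.2.1) (pvWitness_get_multiplicity_atoms.2.2.2.1) (pvWitness_get_multiplicity_atoms.2.2.2.2) ∧
    Pre_get_multiplicity_atoms (pvWitness_get_multiplicity_atoms.1) (pvWitness_get_multiplicity_atoms.2.1) (pvWitness_get_multiplicity_atoms.2.2.1) (pvWitness_get_multiplicity_atoms.2.2.2.1) (pvWitness_get_multiplicity_atoms.2.2.2.2) := by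
  decide

-- ===== VERDICT (by name: the statement is the Claim_ definition above) =====
theorem get_multiplicity_atoms_spec : Claim_equal_get_multiplicity_atoms := by
  intro bridge P2s P3s res set_to_90 _ _
  unfold Spec_get_multiplicity_atoms get_multiplicity_atoms get_multiplicity_atoms_alt
  cases set_to_90 with
  | true => rfl
  | false =>
    simp only [Bool.false_eq_true, if_false]
    rw [pv_compress_eq]
    cases PySem.Dict.get? (PySem.Dict.mk bridge) "A" with
    | none => rfl
    | some la => exact pv_outer_eq bridge P2s P3s res _ la
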